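-- pv_equiv track=rewrite | github.com/Bots-Avatar/ExplainitAll | explainitall/gpt_like_interp/inseq_helpers.py | calculate_mask
-- ===== SOURCE A (Python) =====
-- def calculate_mask(grouped_elements):
--     lengths = list(map(len, grouped_elements))
--     ranges = []
--     start_index = 0
--     for length in lengths:
--         end_index = start_index + length
--         ranges.append([start_index, end_index])
--         start_index = end_index
--     return ranges
-- ===== SOURCE B (Python) =====
-- def _solve(gs):
--     # returns (total length of gs's groups, ranges of gs relative to offset 0)
--     if not gs:
--         return 0, []
--     if len(gs) == 1:
--         l = len(gs[0])
--         return l, [[0, l]]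
--     mid = len(gs) // 2
--     lt, lr = _solve(gs[:mid])
--     rt, rr = _solve(gs[mid:])
--     return lt + rt, lr + [[s + lt, e + lt] for s, e in rr]
--
--
-- def calculate_mask(grouped_elements):
--     return _solve(grouped_elements)[1]
-- ===== Notes on version B (the rewrite author's own statement) =====
-- stated objective: alternative
-- what changed: Replaces A's single left-to-right running-offset loop with a divide-and-conquer: split the groups in half, solve each half relative to offset 0, then merge by shifting the right half's ranges by the left half's total length.
import Mathlib
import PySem

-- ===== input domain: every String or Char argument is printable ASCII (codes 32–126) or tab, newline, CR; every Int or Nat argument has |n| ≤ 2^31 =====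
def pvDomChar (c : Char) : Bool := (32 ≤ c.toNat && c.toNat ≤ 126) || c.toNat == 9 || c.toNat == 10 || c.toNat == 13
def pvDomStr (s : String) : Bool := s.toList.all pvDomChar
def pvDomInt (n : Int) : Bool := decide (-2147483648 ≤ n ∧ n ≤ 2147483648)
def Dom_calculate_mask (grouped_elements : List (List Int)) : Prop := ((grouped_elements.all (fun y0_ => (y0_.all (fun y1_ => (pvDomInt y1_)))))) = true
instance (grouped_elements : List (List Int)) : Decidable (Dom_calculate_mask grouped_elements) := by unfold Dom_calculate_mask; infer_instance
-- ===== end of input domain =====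

-- B replaces A's running-offset loop with a divide-and-conquer (solve halves at offset 0, shift-merge); alternative decomposition, same results.
-- ===== PORT A =====
def calculate_mask (grouped_elements : List (List Int)) : List (List Int) :=
  let lengths : List Int := grouped_elements.map (fun g => (g.length : Int))
  (lengths.foldl
    (fun (st : List (List Int) × Int) (length : Int) =>
      let end_index := st.2 + length
      (st.1 ++ [[st.2, end_index]], end_index))
    ([], 0)).1

-- ===== PORT B =====
-- _solve of Source B; `for s, e in rr` destructures each 2-element range, ported as headD/getD (every element of rr is a 2-list).
def pvSolve (gs : List (List Int)) : Int × List (List Int) :=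
  match gs with
  | [] => (0, [])
  | [g] => ((g.length : Int), [[0, (g.length : Int)]])
  | x :: y :: rest =>
    let mid := (x :: y :: rest).length / 2
    let lres := pvSolve ((x :: y :: rest).take mid)
    let rres := pvSolve ((x :: y :: rest).drop mid)
    (lres.1 + rres.1,
     lres.2 ++ rres.2.map (fun p => [p.headD 0 + lres.1, (p.getD 1 0) + lres.1]))
termination_by gs.length
decreasing_by
  · simp [List.length_take]; omega
  · simp [List.length_drop]; omega

def calculate_mask_alt (grouped_elements : List (List Int)) : List (List Int) :=
  (pvSolve grouped_elements).2

-- ===== PRECONDITION & SPEC =====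
def Spec_calculate_mask (grouped_elements : List (List Int)) (out : List (List Int)) : Prop := out = calculate_mask_alt grouped_elements
instance (grouped_elements : List (List Int)) (out : List (List Int)) : Decidable (Spec_calculate_mask grouped_elements out) := by unfold Spec_calculate_mask; infer_instance

-- ===== CLAIM (what is proved, stated in full; the proofs are below) =====
def Claim_equal_calculate_mask : Prop := ∀ (grouped_elements : List (List Int)), Dom_calculate_mask grouped_elements → Spec_calculate_mask grouped_elements (calculate_mask grouped_elements)

-- ===== LEMMAS AND PROOFS =====

-- the ranges of gs when numbering starts at offset s
def pvMaskFrom (s : Int) : List (List Int) → List (List Int)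
  | [] => []
  | g :: gs => [s, s + (g.length : Int)] :: pvMaskFrom (s + (g.length : Int)) gs

def pvSumLen (gs : List (List Int)) : Int := (gs.map (fun g => (g.length : Int))).sum

theorem pvSumLen_cons (g : List Int) (gs : List (List Int)) :
    pvSumLen (g :: gs) = (g.length : Int) + pvSumLen gs := by
  simp [pvSumLen]

theorem pvMaskFrom_append (s : Int) (l r : List (List Int)) :
    pvMaskFrom s (l ++ r) = pvMaskFrom s l ++ pvMaskFrom (s + pvSumLen l) r := by
  induction l generalizing s with
  | nil => simp [pvMaskFrom, pvSumLen]
  | cons g gs ih =>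
      simp [pvMaskFrom, ih, pvSumLen_cons]
      ring_nf

theorem pvSumLen_append (l r : List (List Int)) :
    pvSumLen (l ++ r) = pvSumLen l + pvSumLen r := by
  simp [pvSumLen]

theorem pvMaskFrom_shift (t : Int) (gs : List (List Int)) :
    pvMaskFrom t gs = (pvMaskFrom 0 gs).map (fun p => [p.headD 0 + t, (p.getD 1 0) + t]) := by
  have key : ∀ (gs : List (List Int)) (s : Int),
      pvMaskFrom (s + t) gs = (pvMaskFrom s gs).map (fun p => [p.headD 0 + t, (p.getD 1 0) + t]) := by
    intro gs
    induction gs with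
    | nil => intro s; simp [pvMaskFrom]
    | cons g gs ih =>
        intro s
        rw [pvMaskFrom, pvMaskFrom, List.map_cons]
        congr 1
        · simp; omega
        · rw [show s + t + (g.length : Int) = s + (g.length : Int) + t by ring]
          exact ih (s + (g.length : Int))
  simpa using key gs 0

theorem pvSolve_eq (gs : List (List Int)) :
    pvSolve gs = (pvSumLen gs, pvMaskFrom 0 gs) := by
  induction gs using pvSolve.induct with
  | case1 => simp [pvSolve, pvSumLen, pvMaskFrom]
  | case2 g => simp [pvSolve, pvSumLen, pvMaskFrom]
  | case3 x y rest mid ih1 ih2 =>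
      rw [pvSolve]
      have h1 : pvSolve (List.take ((x :: y :: rest).length / 2) (x :: y :: rest))
          = (pvSumLen (List.take ((x :: y :: rest).length / 2) (x :: y :: rest)),
             pvMaskFrom 0 (List.take ((x :: y :: rest).length / 2) (x :: y :: rest))) := ih1
      have h2 : pvSolve (List.drop ((x :: y :: rest).length / 2) (x :: y :: rest))
          = (pvSumLen (List.drop ((x :: y :: rest).length / 2) (x :: y :: rest)),
             pvMaskFrom 0 (List.drop ((x :: y :: rest).length / 2) (x :: y :: rest))) := ih2
      simp only [h1, h2, Prod.mk.injEq]
      refine ⟨?_, ?_⟩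
      · rw [← pvSumLen_append, List.take_append_drop]
      · rw [← pvMaskFrom_shift]
        conv_rhs => rw [← List.take_append_drop ((x :: y :: rest).length / 2) (x :: y :: rest)]
        rw [pvMaskFrom_append, zero_add]

theorem pv_fold_eq (gs : List (List Int)) (acc : List (List Int)) (s : Int) :
    ((gs.map (fun g => (g.length : Int))).foldl
      (fun (st : List (List Int) × Int) (length : Int) =>
        let e := st.2 + length
        (st.1 ++ [[st.2, e]], e)) (acc, s)).1
    = acc ++ pvMaskFrom s gs := by
  induction gs generalizing acc s with
  | nil => simp [pvMaskFrom]
  | cons g gs ih => simp [pvMaskFrom, ih]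

-- ===== VERDICT (by name: the statement is the Claim_ definition above) =====
theorem calculate_mask_spec : Claim_equal_calculate_mask := by
  intro ge _
  unfold Spec_calculate_mask calculate_mask calculate_mask_alt
  rw [pvSolve_eq]
  simpa using pv_fold_eq ge [] 0
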